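-- pv_equiv track=rewrite | github.com/leesamuel423/algo-grind | py/1852/main.py | distinctNumbers
-- ===== SOURCE A (Python) =====
-- from collections import defaultdict
-- from typing import List
--
-- def distinctNumbers(nums: List[int], k: int) -> List[int]:
--     if len(nums) < k:
--         return []
--
--     cache = defaultdict(int)
--     output = []
--
--     for i in range(len(nums)):
--         if i > k - 1:
--             prev = nums[i - k]
--             cache[prev] -= 1
--             if cache[prev] == 0:
--                 del cache[prev]
--         cache[nums[i]] += 1
--         if i > k - 2:
--             output.append(len(cache))
--     return output
-- ===== SOURCE B (Python) =====
-- def distinctNumbers(nums, k):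
--     return [len(set(nums[i:i + k])) for i in range(len(nums) - k + 1)]
-- ===== Notes on version B (the rewrite author's own statement) =====
-- stated objective: alternative
-- what changed: The incremental pass that maintains a running count dictionary across windows is replaced by a stateless per-window comprehension [len(set(nums[i:i+k])) for i in range(len(nums)-k+1)]; Pre_ excludes window sizes k <= 0, outside the problem's domain, where A raises IndexError (k < 0 with nonempty nums) or returns an accidental value (prefix distinct counts for k = 0, [] for k < 0 with empty nums) while B returns a list of zero counts for empty windows.
-- outside the precondition, e.g. on distinctNumbers([1, 2], 0): A returns [1, 2], B returns [0, 0, 0]; on distinctNumbers([], -1): A returns [], B returns [0, 0]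
import Mathlib
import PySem

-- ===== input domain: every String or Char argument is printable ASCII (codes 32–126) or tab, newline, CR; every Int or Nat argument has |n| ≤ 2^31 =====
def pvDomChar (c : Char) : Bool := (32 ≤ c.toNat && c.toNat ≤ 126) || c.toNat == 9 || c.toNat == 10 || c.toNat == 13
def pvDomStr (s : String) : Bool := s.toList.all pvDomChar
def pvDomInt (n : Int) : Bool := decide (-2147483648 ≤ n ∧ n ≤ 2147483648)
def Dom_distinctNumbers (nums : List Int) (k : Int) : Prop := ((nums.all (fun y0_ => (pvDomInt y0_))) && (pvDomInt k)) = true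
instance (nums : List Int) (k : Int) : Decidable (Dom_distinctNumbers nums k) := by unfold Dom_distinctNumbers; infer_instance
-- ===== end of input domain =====

-- B replaces A's single incremental pass with a running count dictionary by a stateless
-- per-window rebuild: one distinct-set per window (objective: alternative, not faster).

-- ===== PORT A =====
-- the loop body of A's single for-loop over i in range(len(nums))
def aStep (nums : List Int) (k : Int) (st : PySem.Dict Int Int × List Int) (i : Int) :
    PySem.Dict Int Int × List Int :=
  let cache := st.1
  let output := st.2
  let cache1 :=
    if i > k - 1 then
      let prev := PySem.List.pyGetD nums (i - k) 0
      let cache' := cache.insert prev (cache.getD prev 0 - 1)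
      if cache'.getD prev 0 = 0 then cache'.erase prev else cache'
    else cache
  let x := PySem.List.pyGetD nums i 0
  let cache2 := cache1.insert x (cache1.getD x 0 + 1)
  let output2 := if i > k - 2 then output ++ [(cache2.size : Int)] else output
  (cache2, output2)

def distinctNumbers (nums : List Int) (k : Int) : List Int :=
  if (nums.length : Int) < k then []
  else
    ((PySem.List.pyRange 0 (nums.length : Int) 1).foldl (aStep nums k)
      (PySem.Dict.empty, [])).2

-- ===== PORT B =====
def distinctNumbers_alt (nums : List Int) (k : Int) : List Int :=
  (PySem.List.pyRange 0 ((nums.length : Int) - k + 1) 1).map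
    (fun i => ((PySem.Set.ofList (PySem.List.slice nums (some i) (some (i + k)))).length : Int))

-- ===== PRECONDITION & SPEC =====
-- Pre_ excludes window sizes k ≤ 0, outside the problem's domain, where A raises IndexError
-- (k < 0 with nonempty nums) or returns an accidental value (prefix distinct counts for k = 0,
-- [] for k < 0 with empty nums) while B returns a list of zero counts for empty windows.
def Pre_distinctNumbers (nums : List Int) (k : Int) : Prop := 1 ≤ k
instance (nums : List Int) (k : Int) : Decidable (Pre_distinctNumbers nums k) := by
  unfold Pre_distinctNumbers; infer_instance
def pvWitness_distinctNumbers : List Int × Int := ([1, 2, 2, 3], 2)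

def Spec_distinctNumbers (nums : List Int) (k : Int) (out : List Int) : Prop := out = distinctNumbers_alt nums k
instance (nums : List Int) (k : Int) (out : List Int) : Decidable (Spec_distinctNumbers nums k out) := by unfold Spec_distinctNumbers; infer_instance

-- ===== CLAIM (what is proved, stated in full; the proofs are below) =====
def Claim_equal_distinctNumbers : Prop := ∀ (nums : List Int) (k : Int), Dom_distinctNumbers nums k → Pre_distinctNumbers nums k → Spec_distinctNumbers nums k (distinctNumbers nums k)

-- ===== LEMMAS AND PROOFS =====

-- the window of the last min(n, k) elements of the length-n prefix of nums
def pvWin (nums : List Int) (kn n : Nat) : List Int := (nums.take n).drop (n - kn)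

-- A's cache represents exactly the multiset of the current window
def pvInv (w : List Int) (d : PySem.Dict Int Int) : Prop :=
  d.keys.Nodup ∧ (∀ v, d.getD v 0 = (w.count v : Int)) ∧ (∀ v, d.contains v = true ↔ v ∈ w)

theorem find?_filter_ne {ν : Type} (l : List (Int × ν)) (k k' : Int) :
    (l.filter (fun p => !(p.1 == k))).find? (fun p => p.1 == k') =
      if k' = k then none else l.find? (fun p => p.1 == k') := by
  by_cases hkk : k' = k
  · subst hkk
    rw [if_pos rfl, List.find?_eq_none]
    intro p hp
    simp only [List.mem_filter, Bool.not_eq_eq_eq_not, Bool.not_true, beq_eq_false_iff_ne] at hp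
    simpa using hp.2
  · have hkk2 : (k == k') = false := beq_eq_false_iff_ne.mpr (fun e => hkk e.symm)
    rw [if_neg hkk]
    induction l with
    | nil => simp
    | cons a l ih =>
      by_cases h1 : a.1 = k
      · have h2 : (a.1 == k') = false :=
          beq_eq_false_iff_ne.mpr (fun e => hkk (e.symm.trans h1))
        simp [h1, hkk2, ih]
      · rw [List.filter_cons, if_pos (by simp [h1]), List.find?_cons]
        by_cases h2 : a.1 = k'
        · simp [h2]
        · have h2' : (a.1 == k') = false := beq_eq_false_iff_ne.mpr h2
          simp [h2', ih]

theorem dict_get?_erase (d : PySem.Dict Int Int) (k k' : Int) :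
    (d.erase k).get? k' = if k' = k then none else d.get? k' := by
  rcases d with ⟨l⟩
  simp only [PySem.Dict.erase, PySem.Dict.get?, find?_filter_ne]
  split <;> simp

theorem dict_getD_erase (d : PySem.Dict Int Int) (k k' : Int) (d0 : Int) :
    (d.erase k).getD k' d0 = if k' = k then d0 else d.getD k' d0 := by
  simp only [PySem.Dict.getD, dict_get?_erase]
  split <;> simp

theorem dict_contains_erase (d : PySem.Dict Int Int) (k v : Int) :
    (d.erase k).contains v = true ↔ v ≠ k ∧ d.contains v = true := by
  rcases d with ⟨l⟩
  simp only [PySem.Dict.erase, PySem.Dict.contains, List.any_eq_true, List.mem_filter]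
  constructor
  · rintro ⟨p, ⟨hp, hpk⟩, hpv⟩
    refine ⟨?_, p, hp, hpv⟩
    simp only [beq_iff_eq] at hpv hpk ⊢
    simp only [Bool.not_eq_eq_eq_not, Bool.not_true, beq_eq_false_iff_ne, ne_eq] at hpk
    exact fun e => hpk (hpv.trans e)
  · rintro ⟨hvk, p, hp, hpv⟩
    refine ⟨p, ⟨hp, ?_⟩, hpv⟩
    simp only [beq_iff_eq] at hpv
    simp [hpv, hvk]

theorem dict_nodup_keys_erase (d : PySem.Dict Int Int) (k : Int) (h : d.keys.Nodup) :
    (d.erase k).keys.Nodup := by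
  rcases d with ⟨l⟩
  exact List.Nodup.sublist (List.Sublist.map Prod.fst List.filter_sublist) h

theorem dict_size_eq_keys_length (d : PySem.Dict Int Int) : d.size = d.keys.length := by
  rcases d with ⟨l⟩
  simp [PySem.Dict.size, PySem.Dict.keys]

theorem pvInv_size (w : List Int) (d : PySem.Dict Int Int) (h : pvInv w d) :
    d.size = (PySem.Set.ofList w).length := by
  obtain ⟨hnd, _, hm⟩ := h
  rw [dict_size_eq_keys_length]
  refine List.Perm.length_eq ?_
  rw [List.perm_ext_iff_of_nodup hnd (PySem.Set.nodup_ofList w)]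
  intro v
  rw [PySem.Set.mem_ofList, ← hm v, PySem.Dict.contains_iff_mem_keys]

theorem pvInv_remove (p : Int) (t : List Int) (d : PySem.Dict Int Int) (h : pvInv (p :: t) d) :
    pvInv t
      (if (d.insert p (d.getD p 0 - 1)).getD p 0 = 0
        then (d.insert p (d.getD p 0 - 1)).erase p
        else d.insert p (d.getD p 0 - 1)) := by
  obtain ⟨hnd, hc, hm⟩ := h
  have hdp : d.getD p 0 = (t.count p : Int) + 1 := by
    rw [hc p]; simp
  have hd1 : ∀ v, (d.insert p (d.getD p 0 - 1)).getD v 0 = (t.count v : Int) := by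
    intro v
    rw [PySem.Dict.getD_insert]
    by_cases hv : v = p
    · simp [hv, hdp]
    · simp only [hv, if_false]
      rw [hc v]
      have hv' : ¬ p = v := fun e => hv e.symm
      simp [hv']
  have hd1c : ∀ v, (d.insert p (d.getD p 0 - 1)).contains v = true ↔ v = p ∨ v ∈ p :: t := by
    intro v
    rw [PySem.Dict.contains_insert]
    simp [hm v]
  by_cases h0 : (d.insert p (d.getD p 0 - 1)).getD p 0 = 0
  · rw [if_pos h0]
    have hpt : p ∉ t := by
      rw [hd1 p] at h0
      exact List.count_eq_zero.mp (by exact_mod_cast h0)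
    refine ⟨dict_nodup_keys_erase _ p (PySem.Dict.nodup_keys_insert d p _ hnd), ?_, ?_⟩
    · intro v
      rw [dict_getD_erase]
      by_cases hv : v = p
      · simp [hv, List.count_eq_zero.mpr hpt]
      · simp only [hv, if_false]; exact hd1 v
    · intro v
      rw [dict_contains_erase, hd1c v]
      constructor
      · rintro ⟨hvp, hv⟩
        rcases hv with hv | hv
        · exact absurd hv hvp
        · rcases List.mem_cons.mp hv with hv | hv
          · exact absurd hv hvp
          · exact hv
      · intro hv
        exact ⟨fun e => hpt (e ▸ hv), Or.inr (List.mem_cons_of_mem p hv)⟩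
  · rw [if_neg h0]
    have hpt : p ∈ t := by
      rw [hd1 p] at h0
      have hne : t.count p ≠ 0 := by exact_mod_cast h0
      exact List.count_pos_iff.mp (Nat.pos_of_ne_zero hne)
    refine ⟨PySem.Dict.nodup_keys_insert d p _ hnd, hd1, ?_⟩
    intro v
    rw [hd1c v]
    constructor
    · rintro (hv | hv)
      · exact hv ▸ hpt
      · rcases List.mem_cons.mp hv with hv | hv
        · exact hv ▸ hpt
        · exact hv
    · intro hv; exact Or.inr (List.mem_cons_of_mem p hv)

theorem pvInv_add (x : Int) (t : List Int) (d : PySem.Dict Int Int) (h : pvInv t d) :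
    pvInv (t ++ [x]) (d.insert x (d.getD x 0 + 1)) := by
  obtain ⟨hnd, hc, hm⟩ := h
  refine ⟨PySem.Dict.nodup_keys_insert d x _ hnd, ?_, ?_⟩
  · intro v
    rw [PySem.Dict.getD_insert]
    by_cases hv : v = x
    · subst hv; rw [hc v]; simp [List.count_append]
    · simp only [hv, if_false]
      rw [hc v]
      have hv' : ¬ x = v := fun e => hv e.symm
      simp [List.count_append, hv']
  · intro v
    rw [PySem.Dict.contains_insert]
    simp [hm v, or_comm]

theorem pvWin_succ_lt (nums : List Int) (kn n : Nat) (hn : n < nums.length) (h : n < kn) :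
    pvWin nums kn (n + 1) = pvWin nums kn n ++ [nums[n]] := by
  unfold pvWin
  have h1 : n - kn = 0 := by omega
  have h2 : n + 1 - kn = 0 := by omega
  rw [h1, h2, List.drop_zero, List.drop_zero, List.take_add_one]
  simp [List.getElem?_eq_getElem hn]

theorem pvWin_cons (nums : List Int) (kn n : Nat) (hn : n ≤ nums.length) (hk : 1 ≤ kn)
    (h : kn ≤ n) :
    pvWin nums kn n = nums[n - kn]'(by omega) :: (nums.take n).drop (n - kn + 1) := by
  unfold pvWin
  have hlt : n - kn < (nums.take n).length := by rw [List.length_take]; omega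
  rw [List.drop_eq_getElem_cons hlt]
  congr 1
  exact List.getElem_take

theorem pvWin_succ_ge (nums : List Int) (kn n : Nat) (hn : n < nums.length) (hk1 : 1 ≤ kn) (h : kn ≤ n) :
    pvWin nums kn (n + 1) = (nums.take n).drop (n - kn + 1) ++ [nums[n]] := by
  unfold pvWin
  have h2 : n + 1 - kn = n - kn + 1 := by omega
  rw [h2, List.take_succ, List.getElem?_eq_getElem hn]
  simp only [Option.toList_some]
  rw [List.drop_append_of_le_length (by rw [List.length_take]; omega)]

theorem pvWin_slice (nums : List Int) (kn n : Nat) (hn : n ≤ nums.length) (h : kn ≤ n) :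
    PySem.List.slice nums (some ((n : Int) - kn)) (some (n : Int)) = pvWin nums kn n := by
  have e1 : ((n : Int) - kn) = ((n - kn : Nat) : Int) := by omega
  have e2 : ((n : Int)) = ((n : Nat) : Int) := rfl
  rw [e1, e2, PySem.List.slice_natCast, pvWin, List.drop_take]

-- the single induction over A's loop: the cache tracks the current window and the output
-- accumulated so far is exactly B's per-window list, truncated to the windows already closed
theorem loop_inv (nums : List Int) (k : Int) (hk : 1 ≤ k) (n : Nat) (hn : n ≤ nums.length) :
    pvInv (pvWin nums k.toNat n)
        (((PySem.List.pyRange 0 (n : Int) 1).foldl (aStep nums k) (PySem.Dict.empty, [])).1) ∧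
      ((PySem.List.pyRange 0 (n : Int) 1).foldl (aStep nums k) (PySem.Dict.empty, [])).2 =
        (PySem.List.pyRange 0 ((n : Int) - k + 1) 1).map
          (fun i => ((PySem.Set.ofList (PySem.List.slice nums (some i) (some (i + k)))).length : Int)) := by
  induction n with
  | zero =>
    constructor
    · refine ⟨by simp [PySem.Dict.empty, PySem.Dict.keys], ?_, ?_⟩
      · intro v; simp [pvWin, PySem.Dict.getD, PySem.Dict.get?, PySem.Dict.empty]
      · intro v; simp [pvWin, PySem.Dict.contains, PySem.Dict.empty]
    · rw [PySem.List.pyRange_one_eq_nil (by omega), PySem.List.pyRange_one_eq_nil (by omega)]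
      simp
  | succ n ih =>
    have hn' : n ≤ nums.length := by omega
    have hnl : n < nums.length := by omega
    obtain ⟨ih1, ih2⟩ := ih hn'
    have hkn : k = (k.toNat : Int) := by omega
    have hkn1 : 1 ≤ k.toNat := by omega
    have hpeel : PySem.List.pyRange 0 ((n + 1 : Nat) : Int) 1 =
        PySem.List.pyRange 0 (n : Int) 1 ++ [(n : Int)] := by
      have : ((n + 1 : Nat) : Int) = (n : Int) + 1 := by push_cast; ring
      rw [this, PySem.List.pyRange_one_succ_right (by omega)]
    rw [hpeel, List.foldl_append, List.foldl_cons, List.foldl_nil]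
    set st := (PySem.List.pyRange 0 (n : Int) 1).foldl (aStep nums k) (PySem.Dict.empty, []) with hst
    have hx : PySem.List.pyGetD nums (n : Int) 0 = nums[n] := by
      rw [PySem.List.pyGetD_natCast, List.getD_eq_getElem nums 0 hnl]
    -- the cache after this iteration satisfies the invariant for the (n+1)-window
    have hcache : pvInv (pvWin nums k.toNat (n + 1)) (aStep nums k st (n : Int)).1 ∧
        (aStep nums k st (n : Int)).2 =
          (if (n : Int) > k - 2
            then st.2 ++ [(((aStep nums k st (n : Int)).1.size : Int))] else st.2) := by
      by_cases hcase : k ≤ (n : Int)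
      · have hcond : ((n : Int) > k - 1) := by omega
        have hknn : k.toNat ≤ n := by omega
        have hprev : PySem.List.pyGetD nums ((n : Int) - k) 0 = nums[n - k.toNat]'(by omega) := by
          have e : (n : Int) - k = ((n - k.toNat : Nat) : Int) := by omega
          rw [e, PySem.List.pyGetD_natCast, List.getD_eq_getElem nums 0 (by omega)]
        have hwin := pvWin_cons nums k.toNat n hn' hkn1 hknn
        simp only [aStep, hcond, if_true, hx, hprev]
        constructor
        · rw [pvWin_succ_ge nums k.toNat n hnl hkn1 hknn]
          apply pvInv_add
          have := pvInv_remove (nums[n - k.toNat]'(by omega)) ((nums.take n).drop (n - k.toNat + 1)) st.1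
            (by rw [← hwin]; exact ih1)
          exact this
        · trivial
      · have hcond : ¬ ((n : Int) > k - 1) := by omega
        have hknn : n < k.toNat := by omega
        simp only [aStep, hcond, if_false, hx]
        constructor
        · rw [pvWin_succ_lt nums k.toNat n hnl hknn]
          exact pvInv_add nums[n] (pvWin nums k.toNat n) st.1 ih1
        · trivial
    obtain ⟨hc1, hc2⟩ := hcache
    refine ⟨hc1, ?_⟩
    rw [hc2]
    by_cases hout : (n : Int) > k - 2
    · rw [if_pos hout, ih2]
      have hrange : PySem.List.pyRange 0 (((n + 1 : Nat) : Int) - k + 1) 1 =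
          PySem.List.pyRange 0 ((n : Int) - k + 1) 1 ++ [(n : Int) - k + 1] := by
        have e : ((n + 1 : Nat) : Int) - k + 1 = ((n : Int) - k + 1) + 1 := by push_cast; ring
        rw [e, PySem.List.pyRange_one_succ_right (by omega)]
      rw [hrange, List.map_append, List.map_cons, List.map_nil]
      congr 1
      have hsz : (aStep nums k st (n : Int)).1.size =
          (PySem.Set.ofList (pvWin nums k.toNat (n + 1))).length :=
        pvInv_size _ _ hc1
      have hsl : PySem.List.slice nums (some ((n : Int) - k + 1)) (some (((n : Int) - k + 1) + k)) =
          pvWin nums k.toNat (n + 1) := by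
        have e1 : (n : Int) - k + 1 = ((n + 1 : Nat) : Int) - (k.toNat : Int) := by omega
        have e2 : ((n : Int) - k + 1) + k = ((n + 1 : Nat) : Int) := by push_cast; ring
        rw [e2, e1]
        exact pvWin_slice nums k.toNat (n + 1) (by omega) (by omega)
      simp only [hsl, hsz]
    · rw [if_neg hout, ih2]
      rw [PySem.List.pyRange_one_eq_nil (by omega), PySem.List.pyRange_one_eq_nil (by omega)]

-- ===== VERDICT (by name: the statement is the Claim_ definition above) =====
theorem distinctNumbers_spec : Claim_equal_distinctNumbers := by
  intro nums k _hdom hpre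
  unfold Spec_distinctNumbers distinctNumbers distinctNumbers_alt
  have hk : 1 ≤ k := hpre
  by_cases h : (nums.length : Int) < k
  · rw [if_pos h, PySem.List.pyRange_one_eq_nil (by omega), List.map_nil]
  · rw [if_neg h]
    exact (loop_inv nums k hk nums.length le_rfl).2
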